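-- pv_equiv track=rewrite | github.com/AstridCarolinaAr/ADMINISTRAR_CINE_PROYECTO | asientos.py | crear_mapa_asientos
-- ===== SOURCE A (Python) =====
-- import math
--
-- def crear_mapa_asientos(total_asientos):
--     """
--     Crea un mapa de asientos lo m치s cuadrado posible.
--     Busca la combinaci칩n de filas y columnas que se acerque a un cuadrado.
--     """
--
--     mejor_cols = 1
--     mejor_filas = total_asientos
--     mejor_diff = total_asientos
--
--     # Probar columnas desde 1 hasta total_asientos
--     for cols in range(1, total_asientos + 1):
--         filas = math.ceil(total_asientos / cols)
--         if filas * cols < total_asientos: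
--             continue
--         diff = abs(filas - cols)
--         # Elegir la combinaci칩n m치s cuadrada
--         if diff < mejor_diff:
--             mejor_diff = diff
--             mejor_cols = cols
--             mejor_filas = filas
--
--     # Generar etiquetas de columnas (A, B, ..., Z, AA, AB, ...)
--     def generar_columnas(n):
--         cols = []
--         i = 0
--         while len(cols) < n:
--             col = ""
--             j = i
--             while True:
--                 col = chr(ord("A") + (j % 26)) + col
--                 j = j // 26 - 1
--                 if j < 0:
--                     break
--             cols.append(col)
--             i += 1
--         return cols
--
--     columnas = generar_columnas(mejor_cols)
--
--     # Construir mapa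
--     mapa = {}
--     asiento_num = 0
--     for fila in range(1, mejor_filas + 1):
--         for col in columnas:
--             asiento_num += 1
--             if asiento_num > total_asientos:
--                 break
--             mapa[f"{col}{fila}"] = "libre"
--
--     return mapa
-- ===== SOURCE B (Python) =====
-- from math import isqrt
--
-- def crear_mapa_asientos(total_asientos):
--     """Mapa de asientos cuadrado: columnas por formula cerrada (isqrt) en vez de barrer 1..n."""
--     if total_asientos <= 0:
--         return {}
--     n = total_asientos
--     # a = mayor c con c*(c-1) < n  (ultimo punto con ceil(n/c) >= c)
--     a = (isqrt(4 * n - 3) + 1) // 2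
--     fa = -(-n // a) - a                  # f(a) >= 0
--     fa1 = -(-n // (a + 1)) - (a + 1)     # f(a+1) < 0
--     cols = a + 1 if fa + fa1 > 0 else a
--
--     def etiqueta(i):
--         # etiqueta tipo hoja de calculo para la columna i (0-based): A..Z, AA..
--         return ("" if i < 26 else etiqueta(i // 26 - 1)) + chr(65 + i % 26)
--
--     labels = [etiqueta(i) for i in range(cols)]
--     mapa = {}
--     for k in range(n):
--         mapa[labels[k % cols] + str(k // cols + 1)] = "libre"
--     return mapa
-- ===== Notes on version B (the rewrite author's own statement) =====
-- stated objective: alternative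
-- what changed: B replaces A's full scan of all column counts 1..n by a closed-form crossing point computed with isqrt (cols is a or a+1 where a=(isqrt(4n-3)+1)//2), replaces the iterative label builder by a recursive one, and builds the seat dict in one flat k-loop with divmod instead of A's nested row/column loops with a break.
import Mathlib
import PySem

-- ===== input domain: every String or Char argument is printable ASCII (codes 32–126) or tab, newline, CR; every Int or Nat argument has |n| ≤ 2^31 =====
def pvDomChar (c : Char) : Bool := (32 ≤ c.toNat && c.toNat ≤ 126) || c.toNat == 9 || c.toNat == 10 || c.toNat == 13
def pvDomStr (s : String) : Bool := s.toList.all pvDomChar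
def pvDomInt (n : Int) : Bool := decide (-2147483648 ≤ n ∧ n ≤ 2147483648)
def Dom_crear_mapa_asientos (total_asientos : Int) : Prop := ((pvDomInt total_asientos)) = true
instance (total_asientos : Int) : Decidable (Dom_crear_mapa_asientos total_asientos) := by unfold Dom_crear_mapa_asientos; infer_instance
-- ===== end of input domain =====

-- B replaces A's full 1..n scan for the squarest column count by a closed form via isqrt
-- (alternative algorithm; the O(n) map construction dominates both, so no speed is claimed).

-- ===== PORT A =====
-- loop body of A's 'for cols in range(1, total+1)' scan; state = (mejor_diff, mejor_cols, mejor_filas).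
-- math.ceil(total/cols) is ported as the exact integer ceiling -((-total)//cols): on this domain
-- (|total| ≤ 2^31) CPython's float division cannot misround across an integer boundary.
def pvStep (n : Int) (s : Int × Int × Int) (cols : Int) : Int × Int × Int :=
  let filas := -(PySem.Int.floordiv (-n) cols)
  if filas * cols < n then s
  else
    let diff := |filas - cols|
    if diff < s.1 then (diff, cols, filas) else s

-- inner 'while True' of generar_columnas; j stays ≥ 0, and Python's exit test 'j//26 - 1 < 0' is 'j < 26'
def pvColA (j : Nat) (col : List Char) : List Char :=
  let col' := Char.ofNat (65 + j % 26) :: col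
  if j < 26 then col' else pvColA (j / 26 - 1) col'
termination_by j
decreasing_by have := Nat.div_lt_self (by omega : 0 < j) (by omega : 1 < 26); omega

-- outer 'while len(cols) < n: … cols.append(col); i += 1' of generar_columnas
def pvGenColsGo (n : Int) (i : Nat) (acc : List String) : List String :=
  if _h : (acc.length : Int) < n then pvGenColsGo n (i + 1) (acc ++ [String.mk (pvColA i [])])
  else acc
termination_by (n - acc.length).toNat
decreasing_by simp only [List.length_append, List.length_cons, List.length_nil]; omega

-- inner 'for col in columnas' with the counter and the break on 'asiento_num > total_asientos'
def pvFillRowA (n fila : Int) : List String → Int × PySem.Dict String String → Int × PySem.Dict String String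
  | [], st => st
  | col :: rest, (num, mapa) =>
    let num' := num + 1
    if num' > n then (num', mapa)
    else pvFillRowA n fila rest (num', mapa.insert (col ++ PySem.Int.toStr fila) "libre")

def crear_mapa_asientos (total_asientos : Int) : List (String × String) :=
  let st := (PySem.List.pyRange 1 (total_asientos + 1) 1).foldl (pvStep total_asientos)
      (total_asientos, 1, total_asientos)
  let columnas := pvGenColsGo st.2.1 0 []
  ((PySem.List.pyRange 1 (st.2.2 + 1) 1).foldl
      (fun (acc : Int × PySem.Dict String String) fila => pvFillRowA total_asientos fila columnas acc)
      (0, PySem.Dict.empty)).2.items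

-- ===== PORT B =====
-- Source B's recursive etiqueta; i stays ≥ 0, and i//26-1 on Nat is i/26-1 exactly when i ≥ 26
def pvEtiqueta (i : Nat) : List Char :=
  (if i < 26 then [] else pvEtiqueta (i / 26 - 1)) ++ [Char.ofNat (65 + i % 26)]
termination_by i
decreasing_by have := Nat.div_lt_self (by omega : 0 < i) (by omega : 1 < 26); omega

-- body of Source B's 'for k in range(n)' dict-building loop
def pvSeatIns (labels : List String) (cols : Int) (m : PySem.Dict String String) (k : Int) :
    PySem.Dict String String :=
  m.insert (PySem.List.pyGetD labels (PySem.Int.mod k cols) "" ++ PySem.Int.toStr (PySem.Int.floordiv k cols + 1)) "libre"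

def crear_mapa_asientos_alt (total_asientos : Int) : List (String × String) :=
  if total_asientos ≤ 0 then [] else
  let n := total_asientos
  -- a = (isqrt(4n-3)+1)//2 : math.isqrt on the nonnegative 4n-3 is Nat.sqrt
  let a := PySem.Int.floordiv (((4 * n - 3).toNat.sqrt : Int) + 1) 2
  let fa := -(PySem.Int.floordiv (-n) a) - a
  let fa1 := -(PySem.Int.floordiv (-n) (a + 1)) - (a + 1)
  let cols := if fa + fa1 > 0 then a + 1 else a
  let labels := (PySem.List.pyRange 0 cols 1).map (fun i => String.mk (pvEtiqueta i.toNat))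
  ((PySem.List.pyRange 0 n 1).foldl (pvSeatIns labels cols) PySem.Dict.empty).items

-- ===== PRECONDITION & SPEC =====
def Spec_crear_mapa_asientos (total_asientos : Int) (out : List (String × String)) : Prop := out = crear_mapa_asientos_alt total_asientos
instance (total_asientos : Int) (out : List (String × String)) : Decidable (Spec_crear_mapa_asientos total_asientos out) := by unfold Spec_crear_mapa_asientos; infer_instance

-- ===== CLAIM (what is proved, stated in full; the proofs are below) =====
def Claim_equal_crear_mapa_asientos : Prop := ∀ (total_asientos : Int), Dom_crear_mapa_asientos total_asientos → Spec_crear_mapa_asientos total_asientos (crear_mapa_asientos total_asientos)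

-- ===== LEMMAS AND PROOFS =====

-- proof-side abbreviations: g n c = ceil(n/c), f n c = g n c - c, pvA n = B's closed-form crossing point
def pvG (n c : Int) : Int := -(PySem.Int.floordiv (-n) c)
def pvF (n c : Int) : Int := pvG n c - c
def pvA (n : Int) : Int := (((4 * n - 3).toNat.sqrt : Int) + 1) / 2
def pvCstar (n : Int) : Int := if 0 < pvF n (pvA n) + pvF n (pvA n + 1) then pvA n + 1 else pvA n
def pvFinal (n : Int) : Int × Int × Int :=
  if 0 < pvF n (pvA n) + pvF n (pvA n + 1) then
    (-(pvF n (pvA n + 1)), pvA n + 1, pvG n (pvA n + 1))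
  else (pvF n (pvA n), pvA n, pvG n (pvA n))

theorem pvG_char (n c : Int) (hc : 1 ≤ c) : (pvG n c - 1) * c < n ∧ n ≤ pvG n c * c :=
  (PySem.Int.neg_floordiv_neg_eq_iff_of_pos (by omega)).mp rfl

theorem pvA_char (n : Int) (hn : 1 ≤ n) :
    1 ≤ pvA n ∧ pvA n * (pvA n - 1) < n ∧ n ≤ (pvA n + 1) * pvA n := by
  have hMn : (((4 * n - 3).toNat : Int)) = 4 * n - 3 := by omega
  set s : Nat := (4 * n - 3).toNat.sqrt with hs
  have h1 : s * s ≤ (4 * n - 3).toNat := Nat.sqrt_le _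
  have h2 : (4 * n - 3).toNat < (s + 1) * (s + 1) := Nat.lt_succ_sqrt _
  have h1' : (s : Int) * s ≤ 4 * n - 3 := by
    calc ((s * s : Nat) : Int) ≤ ((4 * n - 3).toNat : Int) := by exact_mod_cast h1
    _ = 4 * n - 3 := hMn
  have h2' : 4 * n - 3 < ((s : Int) + 1) * ((s : Int) + 1) := by
    calc 4 * n - 3 = ((4 * n - 3).toNat : Int) := hMn.symm
    _ < (((s + 1) * (s + 1) : Nat) : Int) := by exact_mod_cast h2
    _ = ((s : Int) + 1) * ((s : Int) + 1) := by push_cast; ring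
  have hs1 : 1 ≤ (s : Int) := by nlinarith
  have ha : pvA n = ((s : Int) + 1) / 2 := by rw [pvA, hs]
  have hb : 2 * pvA n ≤ (s : Int) + 1 ∧ (s : Int) ≤ 2 * pvA n := by omega
  refine ⟨by omega, ?_, ?_⟩
  · nlinarith [hb.1, hb.2]
  · nlinarith [hb.1, hb.2]

theorem pvF_nonneg_iff (n c : Int) (hn : 1 ≤ n) (hc : 1 ≤ c) :
    0 ≤ pvF n c ↔ c * (c - 1) < n := by
  obtain ⟨h1, h2⟩ := pvG_char n c hc
  unfold pvF
  constructor
  · intro h; nlinarith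
  · intro h; nlinarith

theorem pvF_nonneg_of_le_a (n c : Int) (hn : 1 ≤ n) (hc : 1 ≤ c) (hca : c ≤ pvA n) :
    0 ≤ pvF n c := by
  obtain ⟨ha1, ha2, _⟩ := pvA_char n hn
  exact (pvF_nonneg_iff n c hn hc).mpr (by nlinarith)

theorem pvF_neg_of_gt_a (n c : Int) (hn : 1 ≤ n) (hc : pvA n + 1 ≤ c) : pvF n c < 0 := by
  obtain ⟨ha1, _, ha3⟩ := pvA_char n hn
  by_contra h
  have := (pvF_nonneg_iff n c hn (by omega)).mp (by omega)
  nlinarith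

theorem pvG_mono (n c : Int) (hn : 1 ≤ n) (hc : 1 ≤ c) : pvG n (c + 1) ≤ pvG n c := by
  obtain ⟨h1, h2⟩ := pvG_char n c hc
  obtain ⟨h3, h4⟩ := pvG_char n (c + 1) (by omega)
  have hq : 1 ≤ pvG n c := by nlinarith
  by_contra h
  nlinarith

theorem pvF_step (n c : Int) (hn : 1 ≤ n) (hc : 1 ≤ c) : pvF n (c + 1) ≤ pvF n c - 1 := by
  have := pvG_mono n c hn hc
  simp only [pvF]; omega

theorem pvF_desc (n : Int) (hn : 1 ≤ n) (ha : 1 ≤ pvA n) :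
    ∀ k : Nat, pvF n (pvA n + 1 + k) ≤ pvF n (pvA n + 1) - k := by
  intro k
  induction k with
  | zero => simp
  | succ k ih =>
    have h := pvF_step n (pvA n + 1 + k) hn (by omega)
    have he : pvA n + 1 + (k + 1 : Nat) = pvA n + 1 + k + 1 := by push_cast; ring
    rw [he]
    push_cast
    omega

theorem pvA_lt (n : Int) (hn : 2 ≤ n) : pvA n < n := by
  obtain ⟨ha1, ha2, _⟩ := pvA_char n (by omega)
  by_contra h
  nlinarith

theorem pvStep_eq (n : Int) (s : Int × Int × Int) (c : Int) :
    pvStep n s c = if pvG n c * c < n then s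
      else if |pvF n c| < s.1 then (|pvF n c|, c, pvG n c) else s := rfl

theorem pvFinal_fst_le (n : Int) : (pvFinal n).1 ≤ -(pvF n (pvA n + 1)) := by
  unfold pvFinal; split <;> omega

-- descending phase: past the crossing no update ever happens
theorem pvDesc (n : Int) (hn : 2 ≤ n) :
    ∀ (t : Nat) (j : Int), j = n + 1 - t → pvA n + 2 ≤ j →
      (PySem.List.pyRange j (n + 1) 1).foldl (pvStep n) (pvFinal n) = pvFinal n := by
  intro t
  induction t with
  | zero =>
    intro j hj _
    rw [PySem.List.pyRange_one_eq_nil (by omega)]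
    rfl
  | succ t ih =>
    intro j hj hja
    by_cases hjn : n + 1 ≤ j
    · rw [PySem.List.pyRange_one_eq_nil (by omega)]; rfl
    · obtain ⟨ha1, _, _⟩ := pvA_char n (by omega)
      rw [PySem.List.pyRange_one_cons (by omega), List.foldl_cons, pvStep_eq]
      have hchar := pvG_char n j (by omega)
      have hfneg : pvF n j < 0 := pvF_neg_of_gt_a n j (by omega) (by omega)
      have hmono : pvF n j ≤ pvF n (pvA n + 1) := by
        have hk := pvF_desc n (by omega) ha1 (j - (pvA n + 1)).toNat
        have he : pvA n + 1 + (((j - (pvA n + 1)).toNat : Int)) = j := by omega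
        rw [he] at hk
        omega
      have hd := pvFinal_fst_le n
      rw [if_neg (by omega), if_neg (by rw [abs_of_neg hfneg]; omega)]
      exact ih (j + 1) (by omega) (by omega)

-- ascending phase: each step strictly improves up to the crossing, then pvDesc
theorem pvAsc (n : Int) (hn : 2 ≤ n) :
    ∀ (t : Nat) (m : Int), m = pvA n - t → 1 ≤ m →
      (PySem.List.pyRange (m + 1) (n + 1) 1).foldl (pvStep n) (pvF n m, m, pvG n m) = pvFinal n := by
  intro t
  induction t with
  | zero =>
    intro m hm hm1
    obtain ⟨ha1, _, _⟩ := pvA_char n (by omega)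
    have hma : m = pvA n := by push_cast at hm; omega
    subst hma
    have haltn := pvA_lt n hn
    rw [PySem.List.pyRange_one_cons (by omega), List.foldl_cons, pvStep_eq]
    have hchar := pvG_char n (pvA n + 1) (by omega)
    have hfneg : pvF n (pvA n + 1) < 0 := pvF_neg_of_gt_a n (pvA n + 1) (by omega) (by omega)
    rw [if_neg (by omega)]
    by_cases hcond : 0 < pvF n (pvA n) + pvF n (pvA n + 1)
    · rw [if_pos (by rw [abs_of_neg hfneg]; simp only []; omega)]
      have hfin : ((|pvF n (pvA n + 1)|, pvA n + 1, pvG n (pvA n + 1)) : Int × Int × Int) = pvFinal n := by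
        unfold pvFinal
        rw [if_pos hcond, abs_of_neg hfneg]
      rw [hfin]
      exact pvDesc n hn (n - 1 - pvA n).toNat (pvA n + 2) (by omega) (by omega)
    · rw [if_neg (by rw [abs_of_neg hfneg]; simp only []; omega)]
      have hfin : ((pvF n (pvA n), pvA n, pvG n (pvA n)) : Int × Int × Int) = pvFinal n := by
        unfold pvFinal
        rw [if_neg hcond]
      rw [hfin]
      exact pvDesc n hn (n - 1 - pvA n).toNat (pvA n + 2) (by omega) (by omega)
  | succ t ih =>
    intro m hm hm1
    obtain ⟨ha1, _, _⟩ := pvA_char n (by omega)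
    have hmlt : m + 1 ≤ pvA n := by push_cast at hm; omega
    have haltn := pvA_lt n hn
    rw [PySem.List.pyRange_one_cons (by omega), List.foldl_cons, pvStep_eq]
    have hchar := pvG_char n (m + 1) (by omega)
    have hfnn : 0 ≤ pvF n (m + 1) := pvF_nonneg_of_le_a n (m + 1) (by omega) (by omega) hmlt
    have hstep := pvF_step n m (by omega) hm1
    rw [if_neg (by omega), if_pos (by rw [abs_of_nonneg hfnn]; simp only []; omega),
      abs_of_nonneg hfnn]
    exact ih (m + 1) (by push_cast; push_cast at hm; omega) (by omega)

theorem pvScan (n : Int) (hn : 1 ≤ n) :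
    (PySem.List.pyRange 1 (n + 1) 1).foldl (pvStep n) (n, 1, n) = pvFinal n := by
  by_cases h1 : n = 1
  · subst h1; decide
  have hn : 2 ≤ n := by omega
  obtain ⟨ha1, _, _⟩ := pvA_char n (by omega)
  have hchar := pvG_char n 1 (by omega)
  rw [mul_one, mul_one] at hchar
  have hg1 : pvG n 1 = n := by omega
  have hf1 : pvF n 1 = n - 1 := by unfold pvF; omega
  rw [PySem.List.pyRange_one_cons (by omega), List.foldl_cons, pvStep_eq, mul_one, hg1,
    if_neg (by omega), if_pos (by rw [hf1, abs_of_nonneg (by omega : (0:Int) ≤ n - 1)]; simp only []; omega)]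
  have hrw : ((|pvF n 1|, 1, n) : Int × Int × Int) = (pvF n 1, 1, pvG n 1) := by
    rw [hf1, hg1, abs_of_nonneg (by omega : (0:Int) ≤ n - 1)]
  rw [hrw]
  exact pvAsc n hn (pvA n - 1).toNat 1 (by omega) (by omega)

-- A's iterative label builder equals B's recursive etiqueta
theorem pvColA_eq (j : Nat) : ∀ col, pvColA j col = pvEtiqueta j ++ col := by
  induction j using Nat.strong_induction_on with
  | _ j ih =>
    intro col
    rw [pvColA, pvEtiqueta]
    by_cases h : j < 26
    · simp [h]
    · have hlt : j / 26 - 1 < j := by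
        have := Nat.div_lt_self (by omega : 0 < j) (by omega : 1 < 26)
        omega
      simp only [if_neg h]
      rw [ih _ hlt]
      simp

theorem pvGenCols_eq (c : Int) :
    ∀ (t : Nat) (i : Nat) (acc : List String), (c - acc.length).toNat = t →
      pvGenColsGo c i acc =
        acc ++ (List.range (c - acc.length).toNat).map (fun s => String.mk (pvEtiqueta (i + s))) := by
  intro t
  induction t with
  | zero =>
    intro i acc ht
    rw [pvGenColsGo, dif_neg (by omega), ht]
    simp
  | succ t ih =>
    intro i acc ht
    rw [pvGenColsGo, dif_pos (by omega),
      ih (i + 1) (acc ++ [String.mk (pvColA i [])])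
        (by simp only [List.length_append, List.length_cons, List.length_nil]; omega)]
    simp only [List.length_append, List.length_cons, List.length_nil]
    rw [ht, List.range_succ_eq_map, List.map_cons, List.map_map, List.append_assoc,
      List.singleton_append, pvColA_eq, List.append_nil]
    have h2 : (c - ((acc.length + (0 + 1) : Nat) : Int)).toNat = t := by push_cast; omega
    rw [h2]
    simp only [Nat.add_zero]
    congr 1
    congr 1
    apply List.map_congr_left
    intro s _
    simp only [Function.comp_apply]
    congr 2
    omega

theorem pvGenCols_labels (c : Int) (hc : 0 ≤ c) :
    pvGenColsGo c 0 [] = (PySem.List.pyRange 0 c 1).map (fun i => String.mk (pvEtiqueta i.toNat)) := by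
  rw [pvGenCols_eq c (c - 0).toNat 0 [] (by simp), PySem.List.pyRange_zero, List.map_map]
  simp only [List.length_nil, Nat.cast_zero, sub_zero, List.nil_append]
  apply List.map_congr_left
  intro s _
  simp [Function.comp]

theorem pvLabels_eq (c : Int) :
    (PySem.List.pyRange 0 c 1).map (fun i => String.mk (pvEtiqueta i.toNat))
      = (List.range c.toNat).map (fun s => String.mk (pvEtiqueta (0 + s))) := by
  rw [PySem.List.pyRange_zero, List.map_map]
  apply List.map_congr_left
  intro s _
  simp [Function.comp]

-- one row of A's nested loop = the corresponding stretch of B's flat loop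
theorem pvInner (n c r : Int) (hn : 1 ≤ n) (hc : 1 ≤ c) (hr : 1 ≤ r) :
    ∀ (m j : Nat) (num : Int) (M : PySem.Dict String String),
      (j : Int) + m = c → num = (r - 1) * c + j → num ≤ min (r * c) n →
      pvFillRowA n r ((List.range m).map (fun s => String.mk (pvEtiqueta (j + s)))) (num, M)
        = ((if r * c ≤ n then r * c else n + 1),
           (PySem.List.pyRange num (min (r * c) n) 1).foldl
             (pvSeatIns ((PySem.List.pyRange 0 c 1).map (fun i => String.mk (pvEtiqueta i.toNat))) c) M) := by
  intro m
  induction m with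
  | zero =>
    intro j num M hjm hnum hle
    have hj : (j : Int) = c := by push_cast at hjm; omega
    have hnum' : num = r * c := by rw [hnum, hj]; ring
    have hrc : r * c ≤ n := le_trans (hnum' ▸ hle) (min_le_right _ _)
    simp only [List.range_zero, List.map_nil, pvFillRowA]
    rw [if_pos hrc, min_eq_left hrc, hnum', PySem.List.pyRange_one_eq_nil (le_refl _)]
    rfl
  | succ m ih =>
    intro j num M hjm hnum hle
    have hjc : (j : Int) < c := by push_cast at hjm; omega
    have hexp : r * c = (r - 1) * c + c := by ring
    have hnumlt : num < r * c := by rw [hnum, hexp]; omega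
    have hnumn : num ≤ n := le_trans hle (min_le_right _ _)
    have hnum0 : 0 ≤ (r - 1) * c := mul_nonneg (by omega) (by omega)
    rw [List.range_succ_eq_map, List.map_cons, List.map_map]
    simp only [pvFillRowA]
    by_cases hbr : num + 1 > n
    · rw [if_pos hbr]
      have hncrc : ¬ r * c ≤ n := by omega
      rw [if_neg hncrc, min_eq_right (by omega : n ≤ r * c),
        (by omega : num = n), PySem.List.pyRange_one_eq_nil (le_refl _)]
      rfl
    · rw [if_neg hbr]
      have hkey : (String.mk (pvEtiqueta (j + 0)) ++ PySem.Int.toStr r)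
          = PySem.List.pyGetD ((PySem.List.pyRange 0 c 1).map (fun i => String.mk (pvEtiqueta i.toNat))) (PySem.Int.mod num c) ""
            ++ PySem.Int.toStr (PySem.Int.floordiv num c + 1) := by
        have hfd : PySem.Int.floordiv num c = r - 1 := by
          rw [PySem.Int.floordiv_eq_iff_of_pos (by omega : (0:Int) < c)]
          constructor
          · rw [hnum]; linarith [Int.natCast_nonneg j]
          · have h5 : (r - 1 + 1) * c = (r - 1) * c + c := by ring
            rw [h5, hnum]; linarith
        have hmod : PySem.Int.mod num c = (j : Int) := by
          have hh := PySem.Int.floordiv_mul_add_mod num c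
          rw [hfd] at hh
          rw [hnum] at hh ⊢
          omega
        rw [hfd, hmod,
          PySem.List.pyGetD_map_pyRange_of_nonneg _ c (j : Int) "" (by omega) hjc]
        simp
      rw [hkey]
      have htail : (List.range m).map ((fun s => String.mk (pvEtiqueta (j + s))) ∘ Nat.succ)
          = (List.range m).map (fun s => String.mk (pvEtiqueta (j + 1 + s))) := by
        apply List.map_congr_left
        intro s _
        simp only [Function.comp_apply]
        congr 2
        omega
      rw [htail,
        PySem.List.pyRange_one_cons (lt_min hnumlt (by omega)), List.foldl_cons]
      exact ih (j + 1) (num + 1) _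
        (by push_cast; push_cast at hjm; omega)
        (by rw [hnum]; push_cast; ring)
        (le_min (by omega) (by omega))


-- all rows of A's nested loop = B's flat loop over [start, n)
theorem pvOuter (n c : Int) (hn : 1 ≤ n) (hc : 1 ≤ c) (hF1 : (pvG n c - 1) * c < n)
    (hF2 : n ≤ pvG n c * c) :
    ∀ (t : Nat) (r : Int) (M : PySem.Dict String String), r = pvG n c - t → 1 ≤ r →
      ((PySem.List.pyRange r (pvG n c + 1) 1).foldl
          (fun (acc : Int × PySem.Dict String String) fila =>
            pvFillRowA n fila ((PySem.List.pyRange 0 c 1).map (fun i => String.mk (pvEtiqueta i.toNat))) acc)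
          ((r - 1) * c, M)).2
        = (PySem.List.pyRange ((r - 1) * c) n 1).foldl
            (pvSeatIns ((PySem.List.pyRange 0 c 1).map (fun i => String.mk (pvEtiqueta i.toNat))) c) M := by
  have hexp : pvG n c * c = (pvG n c - 1) * c + c := by ring
  intro t
  induction t with
  | zero =>
    intro r M hr0 hr1
    have hrF : r = pvG n c := by push_cast at hr0; omega
    subst hrF
    rw [PySem.List.pyRange_one_singleton, List.foldl_cons, List.foldl_nil, pvLabels_eq c,
      pvInner n c (pvG n c) hn hc (by omega) c.toNat 0 ((pvG n c - 1) * c) M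
        (by push_cast; omega) (by push_cast; ring)
        (le_min (by linarith) (by omega))]
    rw [min_eq_right hF2, pvLabels_eq c]
  | succ t ih =>
    intro r M hr0 hr1
    have hrlt : r ≤ pvG n c - 1 := by push_cast at hr0; omega
    have hexp2 : r * c = (r - 1) * c + c := by ring
    have hrcn : r * c ≤ n := by nlinarith
    rw [PySem.List.pyRange_one_cons (show r < pvG n c + 1 by omega), List.foldl_cons,
      pvLabels_eq c,
      pvInner n c r hn hc hr1 c.toNat 0 ((r - 1) * c) M
        (by push_cast; omega) (by push_cast; ring)
        (le_min (by linarith) (by linarith))]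
    rw [min_eq_left hrcn, if_pos hrcn, pvLabels_eq c]
    have hrec := ih (r + 1)
      ((PySem.List.pyRange ((r - 1) * c) (r * c) 1).foldl
        (pvSeatIns ((PySem.List.pyRange 0 c 1).map (fun i => String.mk (pvEtiqueta i.toNat))) c) M)
      (by push_cast; push_cast at hr0; omega) (by omega)
    rw [show (r + 1 - 1) * c = r * c from by ring, pvLabels_eq c] at hrec
    rw [hrec, ← List.foldl_append,
      ← PySem.List.pyRange_one_append ((r - 1) * c) (r * c) n (by linarith) (by linarith)]

theorem pvMain (n : Int) (hn : 1 ≤ n) : crear_mapa_asientos n = crear_mapa_asientos_alt n := by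
  obtain ⟨ha1, ha2, ha3⟩ := pvA_char n (by omega)
  have hcs1 : 1 ≤ pvCstar n := by unfold pvCstar; split <;> omega
  obtain ⟨hF1, hF2⟩ := pvG_char n (pvCstar n) hcs1
  have hFpos : 1 ≤ pvG n (pvCstar n) := by nlinarith
  have h21 : (pvFinal n).2.1 = pvCstar n := by unfold pvFinal pvCstar; split <;> rfl
  have h22 : (pvFinal n).2.2 = pvG n (pvCstar n) := by unfold pvFinal pvCstar; split <;> rfl
  have haeq : PySem.Int.floordiv (((4 * n - 3).toNat.sqrt : Int) + 1) 2 = pvA n := by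
    rw [PySem.Int.floordiv_eq_ediv_of_pos (by omega : (0:Int) < 2)]; rfl
  unfold crear_mapa_asientos crear_mapa_asientos_alt
  rw [if_neg (by omega : ¬ n ≤ 0)]
  simp only [pvScan n hn, h21, h22, haeq]
  have hcols : (if -PySem.Int.floordiv (-n) (pvA n) - pvA n + (-PySem.Int.floordiv (-n) (pvA n + 1) - (pvA n + 1)) > 0 then pvA n + 1 else pvA n) = pvCstar n := rfl
  rw [hcols, pvGenCols_labels (pvCstar n) (by omega)]
  have hout := pvOuter n (pvCstar n) (by omega) hcs1 hF1 hF2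
    (pvG n (pvCstar n) - 1).toNat 1 PySem.Dict.empty (by push_cast; omega) (by omega)
  rw [show ((1:Int) - 1) * pvCstar n = 0 from by ring] at hout
  rw [hout]

-- ===== VERDICT (by name: the statement is the Claim_ definition above) =====
theorem crear_mapa_asientos_spec : Claim_equal_crear_mapa_asientos := by
  intro n _
  unfold Spec_crear_mapa_asientos
  by_cases h1 : 1 ≤ n
  · exact pvMain n h1
  · -- n ≤ 0: A's two pyRange loops are empty, B returns [] directly
    unfold crear_mapa_asientos crear_mapa_asientos_alt
    rw [if_pos (by omega : n ≤ 0)]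
    simp only [PySem.List.pyRange_one_eq_nil (show n + 1 ≤ 1 by omega), List.foldl_nil]
    rfl
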